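-- pv_equiv track=rewrite | github.com/sonamansuryan/armenian-voice-ai-support-agent | agent.py | _arm_num
-- ===== SOURCE A (Python) =====
-- _ONES = [
--     "", "մեկ", "երկու", "երեք", "չորս", "հինգ",
--     "վեց", "յոթ", "ութ", "ինն", "տաս",
-- ]
--
-- _TEENS = [
--     "տաս", "տասնմեկ", "տասներկու", "տասներեք", "տասնչորս",
--     "տասնհինգ", "տասնվեց", "տասնյոթ", "տասնութ", "տասնինն",
-- ]
--
-- _TENS = [
--     "", "տաս", "քսան", "երեսուն", "քառասուն",
--     "հիսուն", "վաթսուն", "յոթանասուն", "ութսուն", "իննսուն",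
-- ]
--
-- def _arm_num(n: int) -> str:
--     """Convert integer to Armenian words."""
--     if n < 0:
--         return "մինուս " + _arm_num(-n)
--     if n == 0:
--         return "զրո"
--     if n <= 10:
--         return _ONES[n]
--     if 11 <= n <= 19:
--         return _TEENS[n - 10]
--     if n < 100:
--         t = _TENS[n // 10]
--         o = _ONES[n % 10]
--         return t if n % 10 == 0 else t + o
--     if n < 1000:
--         hundreds = "հարյուր" if n // 100 == 1 else _ONES[n // 100] + " հարյուր"
--         rest = n % 100
--         return hundreds + ("" if rest == 0 else " " + _arm_num(rest))
--     if n < 1_000_000: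
--         thousands = "հազար" if n // 1000 == 1 else _arm_num(n // 1000) + " հազար"
--         rest = n % 1000
--         return thousands + ("" if rest == 0 else " " + _arm_num(rest))
--     if n < 1_000_000_000:
--         millions = "միլիոն" if n // 1_000_000 == 1 else _arm_num(n // 1_000_000) + " միլիոն"
--         rest = n % 1_000_000
--         return millions + ("" if rest == 0 else " " + _arm_num(rest))
--     return str(n)
-- ===== SOURCE B (Python) =====
-- _ONES = [
--     "", "մեկ", "երկու", "երեք", "չորս", "հինգ",
--     "վեց", "յոթ", "ութ", "ինն", "տաս",
-- ]
--
-- _TEENS = [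
--     "տաս", "տասնմեկ", "տասներկու", "տասներեք", "տասնչորս",
--     "տասնհինգ", "տասնվեց", "տասնյոթ", "տասնութ", "տասնինն",
-- ]
--
-- _TENS = [
--     "", "տաս", "քսան", "երեսուն", "քառասուն",
--     "հիսուն", "վաթսուն", "յոթանասուն", "ութսուն", "իննսուն",
-- ]
--
--
-- def _below100(v: int) -> str:
--     # 1..99
--     if v <= 10:
--         return _ONES[v]
--     if v <= 19:
--         return _TEENS[v - 10]
--     t = _TENS[v // 10]
--     return t if v % 10 == 0 else t + _ONES[v % 10]
--
--
-- def _below1000(v: int) -> str: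
--     # 1..999
--     if v < 100:
--         return _below100(v)
--     h = "հարյուր" if v // 100 == 1 else _ONES[v // 100] + " հարյուր"
--     r = v % 100
--     return h if r == 0 else h + " " + _below100(r)
--
--
-- def _arm_num(n: int) -> str:
--     """Convert integer to Armenian words (flat group decomposition)."""
--     if n < 0:
--         return "մինուս " + _arm_num(-n)
--     if n == 0:
--         return "զրո"
--     if n >= 1_000_000_000:
--         return str(n)
--     m, r = divmod(n, 1_000_000)
--     t, u = divmod(r, 1000)
--     parts = []
--     if m:
--         parts.append("միլիոն" if m == 1 else _below1000(m) + " միլիոն")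
--     if t:
--         parts.append("հազար" if t == 1 else _below1000(t) + " հազար")
--     if u:
--         parts.append(_below1000(u))
--     return " ".join(parts)
-- ===== Notes on version B (the rewrite author's own statement) =====
-- stated objective: alternative
-- what changed: Replaces A's nested self-recursion through thousands/millions with a flat split of n into three-digit groups, each rendered by a non-recursive below-thousand helper, the pieces joined with a space.
import Mathlib
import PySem

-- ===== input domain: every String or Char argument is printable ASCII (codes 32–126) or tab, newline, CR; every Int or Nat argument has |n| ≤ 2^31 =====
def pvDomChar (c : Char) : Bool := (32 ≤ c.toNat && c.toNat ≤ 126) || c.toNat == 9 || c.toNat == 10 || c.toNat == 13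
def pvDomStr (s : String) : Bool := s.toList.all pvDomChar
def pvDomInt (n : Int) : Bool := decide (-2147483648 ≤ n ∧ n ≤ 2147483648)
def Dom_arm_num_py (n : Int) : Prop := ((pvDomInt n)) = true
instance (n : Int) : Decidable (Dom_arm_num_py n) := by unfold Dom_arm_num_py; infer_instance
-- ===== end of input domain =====

-- B replaces A's nested recursion with a flat three-digit-group split joined by spaces (alternative decomposition, same cost).

-- ===== PORT A =====
def pyONES : List String :=
  ["", "մեկ", "երկու", "երեք", "չորս", "հինգ", "վեց", "յոթ", "ութ", "ինն", "տաս"]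
def pyTEENS : List String :=
  ["տաս", "տասնմեկ", "տասներկու", "տասներեք", "տասնչորս",
   "տասնհինգ", "տասնվեց", "տասնյոթ", "տասնութ", "տասնինն"]
def pyTENS : List String :=
  ["", "տաս", "քսան", "երեսուն", "քառասուն",
   "հիսուն", "վաթսուն", "յոթանասուն", "ութսուն", "իննսուն"]

-- A's body for n ≥ 0 (the negative branch negates once, so recursion stays nonnegative);
-- each list index is in range by the guards, so `getD` is exact.
def armA (n : Nat) : String :=
  if n = 0 then "զրո"
  else if n ≤ 10 then pyONES.getD n ""
  else if n ≤ 19 then pyTEENS.getD (n - 10) ""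
  else if n < 100 then
    (let t := pyTENS.getD (n / 10) ""
     if n % 10 = 0 then t else t ++ pyONES.getD (n % 10) "")
  else if n < 1000 then
    (if n / 100 = 1 then "հարյուր" else pyONES.getD (n / 100) "" ++ " հարյուր") ++
      (if n % 100 = 0 then "" else " " ++ armA (n % 100))
  else if n < 1000000 then
    (if n / 1000 = 1 then "հազար" else armA (n / 1000) ++ " հազար") ++
      (if n % 1000 = 0 then "" else " " ++ armA (n % 1000))
  else if n < 1000000000 then
    (if n / 1000000 = 1 then "միլիոն" else armA (n / 1000000) ++ " միլիոն") ++
      (if n % 1000000 = 0 then "" else " " ++ armA (n % 1000000))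
  else PySem.Int.toStr (Int.ofNat n)
  termination_by n
  decreasing_by all_goals omega

def arm_num_py (n : Int) : String :=
  if n < 0 then "մինուս " ++ armA (-n).toNat else armA n.toNat

-- ===== PORT B =====
def below100 (v : Nat) : String :=
  if v ≤ 10 then pyONES.getD v ""
  else if v ≤ 19 then pyTEENS.getD (v - 10) ""
  else
    let t := pyTENS.getD (v / 10) ""
    if v % 10 = 0 then t else t ++ pyONES.getD (v % 10) ""

def below1000 (v : Nat) : String :=
  if v < 100 then below100 v
  else
    let h := if v / 100 = 1 then "հարյուր" else pyONES.getD (v / 100) "" ++ " հարյուր"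
    let r := v % 100
    if r = 0 then h else h ++ " " ++ below100 r

def altPos (n : Nat) : String :=
  if n = 0 then "զրո"
  else if 1000000000 ≤ n then PySem.Int.toStr (Int.ofNat n)
  else
    let m := n / 1000000
    let r := n % 1000000
    let t := r / 1000
    let u := r % 1000
    let parts : List String :=
      (if m ≠ 0 then [if m = 1 then "միլիոն" else below1000 m ++ " միլիոն"] else []) ++
      (if t ≠ 0 then [if t = 1 then "հազար" else below1000 t ++ " հազար"] else []) ++
      (if u ≠ 0 then [below1000 u] else [])
    PySem.Str.join " " parts

def arm_num_py_alt (n : Int) : String :=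
  if n < 0 then "մինուս " ++ altPos (-n).toNat else altPos n.toNat

-- ===== PRECONDITION & SPEC =====
def Spec_arm_num_py (n : Int) (out : String) : Prop := out = arm_num_py_alt n
instance (n : Int) (out : String) : Decidable (Spec_arm_num_py n out) := by unfold Spec_arm_num_py; infer_instance

-- ===== CLAIM (what is proved, stated in full; the proofs are below) =====
def Claim_equal_arm_num_py : Prop := ∀ (n : Int), Dom_arm_num_py n → Spec_arm_num_py n (arm_num_py n)

-- ===== LEMMAS AND PROOFS =====

theorem eqBelow100 (v : Nat) (h1 : 1 ≤ v) (h2 : v < 100) : armA v = below100 v := by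
  rw [armA.eq_def, below100]
  split_ifs <;> first | rfl | omega

theorem eqBelow1000 (v : Nat) (h1 : 1 ≤ v) (h2 : v < 1000) : armA v = below1000 v := by
  rw [below1000]
  by_cases h : v < 100
  · simp only [if_pos h]; exact eqBelow100 v h1 h
  · rw [armA.eq_def]
    simp only [if_neg h, if_neg (by omega : ¬ v = 0), if_neg (by omega : ¬ v ≤ 10),
      if_neg (by omega : ¬ v ≤ 19), if_pos h2]
    by_cases hr : v % 100 = 0
    · simp [hr]
    · have := eqBelow100 (v % 100) (by omega) (Nat.mod_lt _ (by omega))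
      simp only [hr, this]
      apply String.toList_injective
      simp

theorem join_singleton' (a : String) : PySem.Str.join " " [a] = a := by
  simp [PySem.Str.join, PySem.Chars.join, List.intercalate]

theorem join_cons (a : String) (l : List String) (h : l ≠ []) :
    PySem.Str.join " " (a :: l) = a ++ " " ++ PySem.Str.join " " l := by
  cases l with
  | nil => exact absurd rfl h
  | cons b t =>
    apply String.toList_injective
    simp [PySem.Str.join, PySem.Chars.join_cons_cons]

-- A on 1 ≤ n < 10^6 equals the join of the (thousands, units) pieces B builds for such n.
theorem eqSub1e6 (n : Nat) (h1 : 1 ≤ n) (h2 : n < 1000000) :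
    armA n = PySem.Str.join " "
      ((if n / 1000 ≠ 0 then
          [if n / 1000 = 1 then "հազար" else below1000 (n / 1000) ++ " հազար"] else []) ++
       (if n % 1000 ≠ 0 then [below1000 (n % 1000)] else [])) := by
  by_cases h : n < 1000
  · have ht : n / 1000 = 0 := Nat.div_eq_of_lt h
    have hu : n % 1000 = n := Nat.mod_eq_of_lt h
    simp only [ht, hu, if_neg (by omega : ¬ (0:Nat) ≠ 0), if_pos (by omega : n ≠ 0),
      List.nil_append, join_singleton']
    exact eqBelow1000 n h1 h
  · have ht1 : 1 ≤ n / 1000 := by omega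
    have ht2 : n / 1000 < 1000 := by omega
    rw [armA.eq_def]
    simp only [if_neg (by omega : ¬ n = 0), if_neg (by omega : ¬ n ≤ 10),
      if_neg (by omega : ¬ n ≤ 19), if_neg (by omega : ¬ n < 100),
      if_neg (by omega : ¬ n < 1000), if_pos h2, if_pos (by omega : n / 1000 ≠ 0)]
    by_cases hu : n % 1000 = 0
    · simp only [hu, if_neg (by omega : ¬ (0:Nat) ≠ 0), List.append_nil, join_singleton']
      split_ifs with h1k
      · simp
      · rw [eqBelow1000 _ ht1 ht2]; simp
    · have hu1 : 1 ≤ n % 1000 := by omega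
      have hu2 : n % 1000 < 1000 := Nat.mod_lt _ (by omega)
      rw [if_pos hu, if_neg hu]
      simp only [List.singleton_append]
      rw [join_cons _ _ (by simp), join_singleton']
      split_ifs with h1k
      · rw [eqBelow1000 _ hu1 hu2]
        apply String.toList_injective; simp
      · rw [eqBelow1000 _ ht1 ht2, eqBelow1000 _ hu1 hu2]
        apply String.toList_injective; simp

theorem eqPos (n : Nat) : armA n = altPos n := by
  rw [altPos]
  by_cases h0 : n = 0
  · subst h0; rw [armA.eq_def]; rfl
  by_cases hBig : 1000000000 ≤ n
  · rw [armA.eq_def]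
    simp only [if_neg h0, if_neg (by omega : ¬ n ≤ 10), if_neg (by omega : ¬ n ≤ 19),
      if_neg (by omega : ¬ n < 100), if_neg (by omega : ¬ n < 1000),
      if_neg (by omega : ¬ n < 1000000), if_neg (by omega : ¬ n < 1000000000),
      if_pos hBig]
  · simp only [if_neg h0, if_neg hBig]
    by_cases hM : n < 1000000
    · have hm0 : n / 1000000 = 0 := Nat.div_eq_of_lt hM
      have hr : n % 1000000 = n := Nat.mod_eq_of_lt hM
      simp only [hm0, hr, if_neg (by omega : ¬ (0:Nat) ≠ 0), List.nil_append]
      exact eqSub1e6 n (by omega) hM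
    · have hm1 : 1 ≤ n / 1000000 := Nat.le_div_iff_mul_le (by omega) |>.mpr (by omega)
      have hm2 : n / 1000000 < 1000 := by omega
      rw [armA.eq_def]
      simp only [if_neg h0, if_neg (by omega : ¬ n ≤ 10), if_neg (by omega : ¬ n ≤ 19),
        if_neg (by omega : ¬ n < 100), if_neg (by omega : ¬ n < 1000),
        if_neg (by omega : ¬ n < 1000000), if_pos (by omega : n < 1000000000),
        if_pos (by omega : n / 1000000 ≠ 0)]
      by_cases hr0 : n % 1000000 = 0
      · simp only [hr0, if_neg (by omega : ¬ (0:Nat) ≠ 0), List.append_nil,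
          join_singleton']
        split_ifs with h1m
        · simp
        · rw [eqBelow1000 _ hm1 hm2]
          apply String.toList_injective; simp
      · have hrest := eqSub1e6 (n % 1000000) (by omega) (Nat.mod_lt _ (by omega))
        have hne : ((if n % 1000000 / 1000 ≠ 0 then
              [if n % 1000000 / 1000 = 1 then "հազար"
               else below1000 (n % 1000000 / 1000) ++ " հազար"] else []) ++
             (if n % 1000000 % 1000 ≠ 0 then [below1000 (n % 1000000 % 1000)] else []))
             ≠ ([] : List String) := by
          by_cases hA : n % 1000000 / 1000 = 0 <;>
            by_cases hB : n % 1000000 % 1000 = 0 <;> simp_all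
          omega
        rw [if_neg hr0, List.append_assoc, List.singleton_append, join_cons _ _ hne, ← hrest]
        split_ifs with h1m
        · apply String.toList_injective; simp
        · rw [eqBelow1000 _ hm1 hm2]
          apply String.toList_injective; simp

-- ===== VERDICT (by name: the statement is the Claim_ definition above) =====
theorem arm_num_py_spec : Claim_equal_arm_num_py := by
  intro n _
  unfold Spec_arm_num_py arm_num_py arm_num_py_alt
  split_ifs <;> rw [eqPos]
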